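-- pv_equiv track=rewrite | github.com/thanghh151/SI_Social_Golfer_SAT | sgp_cp_sat.py | find_all_valid_combinations
-- ===== SOURCE A (Python) =====
-- players_per_group = [3, 4]
--
-- def find_all_valid_combinations(num_players, player_per_group):
--     valid_combinations = set()
--
--     k1 = players_per_group[0]
--     k2 = players_per_group[1] if len(players_per_group) > 1 else None
--
--     # Số lượng nhóm tối đa
--     max_groups = num_players // min(players_per_group)
--
--     for num_groups in range(2, max_groups + 1):
--         for m1 in range(0, num_players // k1 + 1):
--             for m2 in range(0, num_players // k2 + 1 if k2 is not None else 1):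
--                 if k2 is not None:
--                     if m1 * k1 + m2 * k2 == num_players and m1 + m2 == num_groups:
--                         valid_combinations.add((k1, k2, m1, m2, num_groups))
--                 else:
--                     if m1 * k1 == num_players and m1 == num_groups:
--                         valid_combinations.add((k1, None, m1, 0, num_groups))
--
--     return list(valid_combinations)
-- ===== SOURCE B (Python) =====
-- def find_all_valid_combinations(num_players, player_per_group):
--     # The original reads the module-level players_per_group = [3, 4], so group
--     # sizes are always k1=3, k2=4.  For a given num_groups = g the system
--     #   3*m1 + 4*m2 == num_players,  m1 + m2 == g
--     # has the unique solution m1 = 4*g - num_players, m2 = num_players - 3*g,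
--     # valid exactly when both are >= 0, i.e. ceil(n/4) <= g <= n//3.
--     if num_players < 0:
--         return []
--     lo = max(2, -((-num_players) // 4))
--     return [(3, 4, 4 * g - num_players, num_players - 3 * g, g)
--             for g in range(lo, num_players // 3 + 1)]
-- ===== Notes on version B (the rewrite author's own statement) =====
-- stated objective: faster
-- what changed: Instead of brute-forcing all (num_groups, m1, m2) triples in three nested loops, B solves the two linear equations for (m1, m2) in closed form and emits the unique candidate per num_groups in one loop over the feasible range.
import Mathlib
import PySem

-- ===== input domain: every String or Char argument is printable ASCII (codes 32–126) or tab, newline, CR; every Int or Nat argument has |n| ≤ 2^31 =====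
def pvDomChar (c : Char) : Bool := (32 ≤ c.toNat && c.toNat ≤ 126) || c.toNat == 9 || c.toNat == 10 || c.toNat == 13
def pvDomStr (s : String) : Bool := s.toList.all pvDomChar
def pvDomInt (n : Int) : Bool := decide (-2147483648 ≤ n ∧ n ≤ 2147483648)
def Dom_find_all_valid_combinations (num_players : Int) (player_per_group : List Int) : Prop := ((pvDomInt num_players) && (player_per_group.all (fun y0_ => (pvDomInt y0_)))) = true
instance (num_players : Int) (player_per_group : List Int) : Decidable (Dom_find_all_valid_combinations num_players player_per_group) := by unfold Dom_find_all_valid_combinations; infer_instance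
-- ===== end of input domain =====

-- B replaces A's three nested brute-force loops by solving the two linear equations for (m1, m2)
-- in closed form, one candidate per num_groups (objective: faster, asymptotic).
-- Note: the Python A ignores its player_per_group parameter and reads the module literal
-- players_per_group = [3, 4]; hence k1 = 3, k2 = 4, min = 3, and the 'k2 is None' branch is
-- statically dead — both facts are folded into the ports below.

-- ===== PORT A =====
def find_all_valid_combinations (num_players : Int) (player_per_group : List Int) : List (List Int) :=
  -- k1 = players_per_group[0] = 3; k2 = players_per_group[1] = 4 (len is 2, never None)
  -- max_groups = num_players // min(players_per_group) = num_players // 3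
  let max_groups : Int := PySem.Int.floordiv num_players 3
  (PySem.List.pyRange 2 (max_groups + 1) 1).foldl (fun vc num_groups =>
    (PySem.List.pyRange 0 (PySem.Int.floordiv num_players 3 + 1) 1).foldl (fun vc m1 =>
      (PySem.List.pyRange 0 (PySem.Int.floordiv num_players 4 + 1) 1).foldl (fun vc m2 =>
        if m1 * 3 + m2 * 4 = num_players ∧ m1 + m2 = num_groups
        then PySem.Set.add vc [3, 4, m1, m2, num_groups]
        else vc) vc) vc) (PySem.Set.empty : PySem.Set (List Int))

-- ===== PORT B =====
def find_all_valid_combinations_alt (num_players : Int) (player_per_group : List Int) : List (List Int) :=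
  if num_players < 0 then []
  else
    let lo : Int := max 2 (-(PySem.Int.floordiv (-num_players) 4))
    (PySem.List.pyRange lo (PySem.Int.floordiv num_players 3 + 1) 1).map
      (fun g => [3, 4, 4 * g - num_players, num_players - 3 * g, g])

-- ===== PRECONDITION & SPEC =====
def Spec_find_all_valid_combinations (num_players : Int) (player_per_group : List Int) (out : List (List Int)) : Prop := out = find_all_valid_combinations_alt num_players player_per_group
instance (num_players : Int) (player_per_group : List Int) (out : List (List Int)) : Decidable (Spec_find_all_valid_combinations num_players player_per_group out) := by unfold Spec_find_all_valid_combinations; infer_instance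

-- ===== CLAIM (what is proved, stated in full; the proofs are below) =====
def Claim_equal_find_all_valid_combinations : Prop := ∀ (num_players : Int) (player_per_group : List Int), Dom_find_all_valid_combinations num_players player_per_group → Spec_find_all_valid_combinations num_players player_per_group (find_all_valid_combinations num_players player_per_group)

-- ===== LEMMAS AND PROOFS =====

-- a fold whose guard never fires is the identity
theorem pvFoldlIfNeg {α β : Type} (l : List α) (p : α → Prop) [DecidablePred p]
    (f : β → α → β) (b : β) (h : ∀ x ∈ l, ¬ p x) :
    l.foldl (fun acc x => if p x then f acc x else acc) b = b := by
  induction l generalizing b with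
  | nil => rfl
  | cons y t ih =>
    rw [List.foldl_cons, if_neg (h y (List.mem_cons_self))]
    exact ih b (fun x hx => h x (List.mem_cons_of_mem _ hx))

-- a fold over a duplicate-free list whose guard fires at exactly one point
theorem pvFoldlIfSingle {α β : Type} [DecidableEq α] (l : List α) (p : α → Prop) [DecidablePred p]
    (f : β → α → β) (b : β) (x0 : α) (hnd : l.Nodup) (hp : ∀ x, p x ↔ x = x0) :
    l.foldl (fun acc x => if p x then f acc x else acc) b = if x0 ∈ l then f b x0 else b := by
  induction l generalizing b with
  | nil => simp
  | cons y t ih =>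
    rcases List.nodup_cons.mp hnd with ⟨hy, hnd'⟩
    by_cases hpy : p y
    · have hyx : y = x0 := (hp y).mp hpy
      subst hyx
      rw [List.foldl_cons, if_pos hpy,
        pvFoldlIfNeg t p f _ (fun x hx hpx => hy (((hp x).mp hpx) ▸ hx))]
      simp
    · have hne : x0 ≠ y := fun h => hpy (h ▸ (hp x0).mpr rfl)
      rw [List.foldl_cons, if_neg hpy, ih b hnd']
      simp [hne]

-- innermost m2-loop of A: fires only when m1 = 4g-n and m2 = n-3g is in range
theorem pvInner2 (n g m1 B2 : Int) (vc : List (List Int)) :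
    (PySem.List.pyRange 0 B2 1).foldl (fun vc m2 =>
        if m1 * 3 + m2 * 4 = n ∧ m1 + m2 = g
        then PySem.Set.add vc [3, 4, m1, m2, g] else vc) vc
    = if m1 = 4 * g - n ∧ (n - 3 * g) ∈ PySem.List.pyRange 0 B2 1
      then PySem.Set.add vc [3, 4, m1, n - 3 * g, g] else vc := by
  by_cases hm : m1 = 4 * g - n
  · subst hm
    rw [pvFoldlIfSingle _ _ _ _ (n - 3 * g) (PySem.List.nodup_pyRange_one 0 B2)
      (fun x => by constructor <;> intro h <;> omega)]
    by_cases hmem : (n - 3 * g) ∈ PySem.List.pyRange 0 B2 1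
    · rw [if_pos hmem, if_pos ⟨rfl, hmem⟩]
    · rw [if_neg hmem, if_neg (fun h => hmem h.2)]
  · rw [pvFoldlIfNeg _ _ _ _ (fun x _ hc => hm (by omega)),
      if_neg (fun h => hm h.1)]

-- middle m1-loop of A collapsed to a single conditional insertion
theorem pvInner1 (n g B1 B2 : Int) (vc : List (List Int)) :
    (PySem.List.pyRange 0 B1 1).foldl (fun vc m1 =>
      (PySem.List.pyRange 0 B2 1).foldl (fun vc m2 =>
        if m1 * 3 + m2 * 4 = n ∧ m1 + m2 = g
        then PySem.Set.add vc [3, 4, m1, m2, g] else vc) vc) vc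
    = if (4 * g - n) ∈ PySem.List.pyRange 0 B1 1 ∧ (n - 3 * g) ∈ PySem.List.pyRange 0 B2 1
      then PySem.Set.add vc [3, 4, 4 * g - n, n - 3 * g, g] else vc := by
  simp only [pvInner2]
  by_cases hQ : (n - 3 * g) ∈ PySem.List.pyRange 0 B2 1
  · rw [pvFoldlIfSingle _ _ _ _ (4 * g - n) (PySem.List.nodup_pyRange_one 0 B1)
      (fun x => by simp [hQ])]
    by_cases hmem : (4 * g - n) ∈ PySem.List.pyRange 0 B1 1
    · rw [if_pos hmem, if_pos ⟨hmem, hQ⟩]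
    · rw [if_neg hmem, if_neg (fun h => hmem h.1)]
  · rw [pvFoldlIfNeg _ _ _ _ (fun x _ hc => hQ hc.2), if_neg (fun h => hQ h.2)]

-- a conditional Set.add loop over fresh, pairwise-distinct elements is append-of-filter
theorem pvFoldlSetAdd (l : List Int) (p : Int → Prop) [DecidablePred p] (e : Int → List Int)
    (vc : List (List Int)) (hnd : (l.map e).Nodup) (hfresh : ∀ g ∈ l, e g ∉ vc) :
    l.foldl (fun vc g => if p g then PySem.Set.add vc (e g) else vc) vc
    = vc ++ (l.filter (fun g => decide (p g))).map e := by
  induction l generalizing vc with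
  | nil => simp
  | cons y t ih =>
    rcases List.nodup_cons.mp hnd with ⟨hy, hnd'⟩
    rw [List.foldl_cons]
    by_cases hpy : p y
    · have hadd : PySem.Set.add vc (e y) = vc ++ [e y] := by
        have hniv : e y ∉ vc := hfresh y List.mem_cons_self
        simp [PySem.Set.add, PySem.Set.contains, hniv]
      have hfresh' : ∀ g ∈ t, e g ∉ vc ++ [e y] := by
        intro g hg
        simp only [List.mem_append, List.mem_singleton]
        rintro (h | h)
        · exact hfresh g (List.mem_cons_of_mem _ hg) h
        · exact hy (h ▸ List.mem_map_of_mem hg)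
      rw [if_pos hpy, hadd, ih _ hnd' hfresh']
      simp [hpy]
    · rw [if_neg hpy, ih _ hnd' (fun g hg => hfresh g (List.mem_cons_of_mem _ hg))]
      simp [hpy]

-- filtering an increasing integer range by a lower bound shrinks it to a range
theorem pvFilterRangeGe (a b t : Int) :
    (PySem.List.pyRange a b 1).filter (fun g => decide (t ≤ g))
    = PySem.List.pyRange (max a t) b 1 := by
  by_cases hab : b ≤ a
  · rw [PySem.List.pyRange_one_eq_nil hab,
      PySem.List.pyRange_one_eq_nil (le_trans hab (le_max_left a t))]
    rfl
  · push Not at hab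
    rw [PySem.List.pyRange_one_cons hab, List.filter_cons]
    by_cases ht : t ≤ a
    · have h2 : max (a + 1) t = a + 1 := max_eq_left (by omega)
      rw [pvFilterRangeGe (a + 1) b t]
      simp [ht, h2, PySem.List.pyRange_one_cons hab]
    · have h1 : max a t = t := max_eq_right (by omega)
      have h2 : max (a + 1) t = t := max_eq_right (by omega)
      rw [pvFilterRangeGe (a + 1) b t]
      simp [ht, h1, h2]
termination_by (b - a).toNat
decreasing_by all_goals omega

-- ===== VERDICT (by name: the statement is the Claim_ definition above) =====
theorem find_all_valid_combinations_spec : Claim_equal_find_all_valid_combinations := by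
  intro n ppg _
  show find_all_valid_combinations n ppg = find_all_valid_combinations_alt n ppg
  unfold find_all_valid_combinations find_all_valid_combinations_alt
  by_cases hn : n < 0
  · have hnil : PySem.Int.floordiv n 3 + 1 ≤ 2 := by
      rw [PySem.Int.floordiv_eq_ediv_of_pos (by norm_num)]; omega
    simp only [if_pos hn, PySem.List.pyRange_one_eq_nil hnil, List.foldl_nil]
    rfl
  · push Not at hn
    simp only [if_neg (not_lt.mpr hn), pvInner1]
    rw [pvFoldlSetAdd _ _ _ _ ?_ (by simp [PySem.Set.empty])]
    · rw [show (PySem.Set.empty : PySem.Set (List Int)) = [] from rfl, List.nil_append]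
      have hcong : (PySem.List.pyRange 2 (PySem.Int.floordiv n 3 + 1) 1).filter
            (fun g => decide ((4 * g - n) ∈ PySem.List.pyRange 0 (PySem.Int.floordiv n 3 + 1) 1
              ∧ (n - 3 * g) ∈ PySem.List.pyRange 0 (PySem.Int.floordiv n 4 + 1) 1))
          = (PySem.List.pyRange 2 (PySem.Int.floordiv n 3 + 1) 1).filter
            (fun g => decide (-(PySem.Int.floordiv (-n) 4) ≤ g)) := by
        apply List.filter_congr
        intro g hg
        rw [PySem.List.mem_pyRange_one] at hg
        simp only [decide_eq_decide, PySem.List.mem_pyRange_one,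
          PySem.Int.floordiv_eq_ediv_of_pos (show (0:Int) < 3 by norm_num),
          PySem.Int.floordiv_eq_ediv_of_pos (show (0:Int) < 4 by norm_num)] at *
        omega
      rw [hcong, pvFilterRangeGe]
    · rw [List.nodup_map_iff_inj_on (PySem.List.nodup_pyRange_one _ _)]
      intro g1 _ g2 _ h
      simpa using congrArg (fun l => l.getLast? ) h
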